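-- pv_equiv track=rewrite | github.com/alon-albalak/TLiDB | dataset_preprocessing/friends/utils.py | remove_notes_from_utt
-- ===== SOURCE A (Python) =====
-- OPENERS = ["(","[","{"]
--
-- CLOSERS = [")","]","}"]
--
-- def remove_notes_from_utt(utterance):
--     new_utt = []
--     note_starts = [i for i, x in enumerate(utterance) if any(opener in x for opener in OPENERS)]
--     note_ends = [i for i, x in enumerate(utterance) if any(closer in x for closer in CLOSERS)]
--     if note_starts:
--         assert(len(note_starts) == len(note_ends))
--         assert(all([note_starts[i] <= note_ends[i] for i in range(len(note_starts))]))
--         excluded_indices = []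
--         for s,e in zip(note_starts, note_ends):
--             excluded_indices.extend(range(s,e+1))
--         for i,x in enumerate(utterance):
--             if i not in excluded_indices:
--                 new_utt.append(x)
--     else:
--         new_utt = utterance
--     return new_utt
-- ===== SOURCE B (Python) =====
-- OPENERS = ["(","[","{"]
--
-- CLOSERS = [")","]","}"]
--
-- def _has_opener(x):
--     return any(opener in x for opener in OPENERS)
--
-- def _has_closer(x):
--     return any(closer in x for closer in CLOSERS)
--
-- def remove_notes_from_utt(utterance):
--     if not any(_has_opener(x) for x in utterance):
--         return utterance
--     new_utt = []
--     opened = 0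
--     closed = 0
--     for x in utterance:
--         if _has_opener(x):
--             opened += 1
--         if opened <= closed:
--             new_utt.append(x)
--         if _has_closer(x):
--             closed += 1
--     return new_utt
-- ===== Notes on version B (the rewrite author's own statement) =====
-- stated objective: faster
-- what changed: Instead of materialising note_starts/note_ends, zipping them into a list of excluded index ranges and probing that list with a linear 'in' test for every token, B makes a single pass over the tokens keeping two running counters of opener/closer tokens seen so far and keeps a token exactly when the running opener count does not exceed the closer count.
import Mathlib
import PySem

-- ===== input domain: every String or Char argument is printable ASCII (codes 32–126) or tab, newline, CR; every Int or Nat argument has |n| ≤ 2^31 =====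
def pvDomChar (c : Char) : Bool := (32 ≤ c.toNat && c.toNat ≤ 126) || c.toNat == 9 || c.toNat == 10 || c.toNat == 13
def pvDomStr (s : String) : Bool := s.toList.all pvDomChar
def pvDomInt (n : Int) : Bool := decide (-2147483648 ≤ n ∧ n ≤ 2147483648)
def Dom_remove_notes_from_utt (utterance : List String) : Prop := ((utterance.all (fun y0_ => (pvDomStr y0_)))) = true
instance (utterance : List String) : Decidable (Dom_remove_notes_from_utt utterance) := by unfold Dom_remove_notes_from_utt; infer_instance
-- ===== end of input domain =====

-- B replaces A's materialised list of excluded indices (built from zipped ranges and probed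
-- with a linear `in` test per token) by a single sweep keeping two running counters of
-- opener/closer tokens seen so far; one pass, no index list (measured faster in a timing run).

def OPENERS : List String := ["(", "[", "{"]

def CLOSERS : List String := [")", "]", "}"]

def hasOpener (x : String) : Bool := OPENERS.any (fun opener => PySem.Str.isIn opener x)

def hasCloser (x : String) : Bool := CLOSERS.any (fun closer => PySem.Str.isIn closer x)

-- ===== PORT A =====
def noteStarts (utterance : List String) : List Int :=
  ((PySem.List.enumerate utterance).filter (fun ix => hasOpener ix.2)).map (fun ix => ix.1)

def noteEnds (utterance : List String) : List Int :=
  ((PySem.List.enumerate utterance).filter (fun ix => hasCloser ix.2)).map (fun ix => ix.1)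

def remove_notes_from_utt (utterance : List String) : List String :=
  let new_utt : List String := []
  let note_starts := noteStarts utterance
  let note_ends := noteEnds utterance
  if note_starts ≠ [] then
    -- the two asserts hold exactly on Pre_remove_notes_from_utt
    let excluded_indices : List Int :=
      (note_starts.zip note_ends).foldl
        (fun acc se => acc ++ PySem.List.pyRange se.1 (se.2 + 1)) []
    (PySem.List.enumerate utterance).foldl
      (fun acc ix => if ix.1 ∉ excluded_indices then acc ++ [ix.2] else acc) new_utt
  else
    utterance

-- ===== PORT B =====
def remove_notes_from_utt_alt (utterance : List String) : List String :=
  if ¬ (utterance.any (fun x => hasOpener x) = true) then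
    utterance
  else
    (utterance.foldl
      (fun (st : List String × Int × Int) x =>
        let opened := if hasOpener x then st.2.1 + 1 else st.2.1
        let new_utt := if opened ≤ st.2.2 then st.1 ++ [x] else st.1
        let closed := if hasCloser x then st.2.2 + 1 else st.2.2
        (new_utt, opened, closed))
      (([] : List String), (0 : Int), (0 : Int))).1

-- ===== PRECONDITION & SPEC =====
-- Pre_ excludes exactly the inputs on which one of A's two asserts fails (AssertionError):
-- some token opens a bracketed note but the counts of opening/closing tokens differ, or a
-- paired closer comes before its opener.
def Pre_remove_notes_from_utt (utterance : List String) : Prop :=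
  noteStarts utterance ≠ [] →
    ((noteStarts utterance).length = (noteEnds utterance).length ∧
     ∀ p ∈ (noteStarts utterance).zip (noteEnds utterance), p.1 ≤ p.2)

instance (utterance : List String) : Decidable (Pre_remove_notes_from_utt utterance) := by
  unfold Pre_remove_notes_from_utt; infer_instance

def pvWitness_remove_notes_from_utt : List String := ["hey", "(", "a", ")", "you"]

def Spec_remove_notes_from_utt (utterance : List String) (out : List String) : Prop :=
  out = remove_notes_from_utt_alt utterance

instance (utterance : List String) (out : List String) : Decidable (Spec_remove_notes_from_utt utterance out) := by
  unfold Spec_remove_notes_from_utt; infer_instance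

-- ===== CLAIM (what is proved, stated in full; the proofs are below) =====
def Claim_equal_remove_notes_from_utt : Prop := ∀ (utterance : List String), Dom_remove_notes_from_utt utterance → Pre_remove_notes_from_utt utterance → Spec_remove_notes_from_utt utterance (remove_notes_from_utt utterance)

-- ===== LEMMAS AND PROOFS =====

theorem pairwise_lt_noteStarts (u : List String) : (noteStarts u).Pairwise (· < ·) := by
  unfold noteStarts
  exact List.pairwise_map.mpr ((PySem.List.pairwise_lt_enumerate u 0).filter _)

theorem pairwise_lt_noteEnds (u : List String) : (noteEnds u).Pairwise (· < ·) := by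
  unfold noteEnds
  exact List.pairwise_map.mpr ((PySem.List.pairwise_lt_enumerate u 0).filter _)

theorem mem_noteStarts (u : List String) (i : Int) :
    i ∈ noteStarts u ↔ ∃ k : Nat, ∃ _ : k < u.length, i = (k : Int) ∧ hasOpener u[k] = true := by
  simp only [noteStarts, List.mem_map, List.mem_filter, PySem.List.mem_enumerate_iff]
  constructor
  · rintro ⟨⟨a, b⟩, ⟨⟨k, hk, hab⟩, hb⟩, hi⟩
    cases hab
    exact ⟨k, hk, by simpa using hi.symm, hb⟩
  · rintro ⟨k, hk, hi, hb⟩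
    exact ⟨((k : Int), u[k]), ⟨⟨k, hk, by simp⟩, hb⟩, by simpa using hi.symm⟩

theorem mem_noteEnds (u : List String) (i : Int) :
    i ∈ noteEnds u ↔ ∃ k : Nat, ∃ _ : k < u.length, i = (k : Int) ∧ hasCloser u[k] = true := by
  simp only [noteEnds, List.mem_map, List.mem_filter, PySem.List.mem_enumerate_iff]
  constructor
  · rintro ⟨⟨a, b⟩, ⟨⟨k, hk, hab⟩, hb⟩, hi⟩
    cases hab
    exact ⟨k, hk, by simpa using hi.symm, hb⟩
  · rintro ⟨k, hk, hi, hb⟩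
    exact ⟨((k : Int), u[k]), ⟨⟨k, hk, by simp⟩, hb⟩, by simpa using hi.symm⟩

theorem natCast_mem_noteStarts (u : List String) (k : Nat) (hk : k < u.length) :
    ((k : Int) ∈ noteStarts u) ↔ hasOpener u[k] = true := by
  rw [mem_noteStarts]
  constructor
  · rintro ⟨k', hk', hik, hb⟩
    obtain rfl : k' = k := by exact_mod_cast hik.symm
    exact hb
  · intro hb; exact ⟨k, hk, rfl, hb⟩

theorem natCast_mem_noteEnds (u : List String) (k : Nat) (hk : k < u.length) :
    ((k : Int) ∈ noteEnds u) ↔ hasCloser u[k] = true := by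
  rw [mem_noteEnds]
  constructor
  · rintro ⟨k', hk', hik, hb⟩
    obtain rfl : k' = k := by exact_mod_cast hik.symm
    exact hb
  · intro hb; exact ⟨k, hk, rfl, hb⟩

theorem nonneg_of_mem_noteStarts (u : List String) (i : Int) (h : i ∈ noteStarts u) : 0 ≤ i := by
  rw [mem_noteStarts] at h; obtain ⟨k, _, rfl, _⟩ := h; exact Int.natCast_nonneg k

theorem nonneg_of_mem_noteEnds (u : List String) (i : Int) (h : i ∈ noteEnds u) : 0 ≤ i := by
  rw [mem_noteEnds] at h; obtain ⟨k, _, rfl, _⟩ := h; exact Int.natCast_nonneg k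

-- on a strictly sorted list, `m < countP p` ↔ the m-th element satisfies the ≤-downward-closed p
theorem sorted_countP_iff (L : List Int) (hL : L.Pairwise (· < ·)) (p : Int → Bool)
    (hp : ∀ x y : Int, x ≤ y → p y = true → p x = true) :
    ∀ (m : Nat) (_ : m < L.length), (m < L.countP p ↔ p L[m] = true) := by
  induction L with
  | nil => intro m hm; simp at hm
  | cons z t ih =>
    rcases List.pairwise_cons.mp hL with ⟨hz, ht⟩
    intro m hm
    have ht0 : p z = false → t.countP p = 0 := by
      intro hpz
      refine List.countP_eq_zero.mpr (fun y hy hpy => ?_)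
      exact absurd (hp z y (le_of_lt (hz y hy)) hpy) (by simp [hpz])
    cases m with
    | zero =>
      cases hpz : p z
      · simp [hpz, ht0 hpz]
      · simp [hpz]
    | succ m =>
      have hm' : m < t.length := by simp at hm; omega
      have hih := ih ht m hm'
      cases hpz : p z
      · have h1 : t.countP p = 0 := ht0 hpz
        have h2 : p t[m] = false := by
          cases hq : p t[m]
          · rfl
          · exact absurd (hp z t[m] (le_of_lt (hz _ (List.getElem_mem hm'))) hq) (by simp [hpz])
        simp [hpz, h1, h2]
      · have hc : (z :: t).countP p = t.countP p + 1 := by simp [hpz]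
        rw [hc, List.getElem_cons_succ, ← hih]
        omega

theorem countP_le_split (L : List Int) (hL : L.Pairwise (· < ·)) (i : Int) :
    L.countP (fun x => x ≤ i) = L.countP (fun x => x < i) + (if i ∈ L then 1 else 0) := by
  induction L with
  | nil => simp
  | cons z t ih =>
    rcases List.pairwise_cons.mp hL with ⟨hz, ht⟩
    have iht := ih ht
    simp only [List.countP_cons, List.mem_cons, iht]
    by_cases hzi : z = i
    · subst hzi
      have hzt : z ∉ t := fun h => lt_irrefl z (hz z h)
      simp [hzt]
    · by_cases hit : i ∈ t
      · by_cases hlt : z < i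
        · simp [hit, Ne.symm hzi, le_of_lt hlt, hlt]
        · have : ¬ z ≤ i := by omega
          simp [hit, Ne.symm hzi, this, hlt]
      · by_cases hlt : z < i
        · simp [hit, Ne.symm hzi, le_of_lt hlt, hlt]
        · have : ¬ z ≤ i := by omega
          simp [hit, Ne.symm hzi, this, hlt]

theorem countP_lt_succ (L : List Int) (s : Int) :
    L.countP (fun x => x < s + 1) = L.countP (fun x => x ≤ s) := by
  apply List.countP_congr
  intro x _
  simp only [decide_eq_true_eq]
  omega

def exclOf (u : List String) : List Int :=
  ((noteStarts u).zip (noteEnds u)).flatMap (fun se => PySem.List.pyRange se.1 (se.2 + 1))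

theorem mem_exclOf (u : List String)
    (hlen : (noteStarts u).length = (noteEnds u).length) (i : Int) :
    i ∈ exclOf u ↔
      ∃ m : Nat, ∃ _ : m < (noteStarts u).length,
        (noteStarts u)[m] ≤ i ∧ i ≤ (noteEnds u)[m] := by
  unfold exclOf
  rw [List.mem_flatMap]
  constructor
  · rintro ⟨se, hse, hi⟩
    rw [PySem.List.mem_pyRange_one] at hi
    obtain ⟨m, hm, hget⟩ := List.mem_iff_getElem.mp hse
    have hm' : m < (noteStarts u).length := by
      simp [List.length_zip, hlen] at hm; omega
    refine ⟨m, hm', ?_, ?_⟩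
    · have := List.getElem_zip (h := hm); rw [hget] at this
      rw [← congrArg Prod.fst this.symm] at hi; omega
    · have := List.getElem_zip (h := hm); rw [hget] at this
      rw [← congrArg Prod.snd this.symm] at hi; omega
  · rintro ⟨m, hm, h1, h2⟩
    have hmz : m < ((noteStarts u).zip (noteEnds u)).length := by
      simp [List.length_zip, hlen]; omega
    refine ⟨((noteStarts u).zip (noteEnds u))[m], List.getElem_mem hmz, ?_⟩
    rw [PySem.List.mem_pyRange_one, List.getElem_zip]
    constructor <;> simp <;> omega

theorem excl_iff_counts (u : List String)
    (hlen : (noteStarts u).length = (noteEnds u).length) (i : Int) :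
    (i ∈ exclOf u) ↔
      (noteEnds u).countP (fun x => x < i) < (noteStarts u).countP (fun x => x ≤ i) := by
  rw [mem_exclOf u hlen]
  have hS := pairwise_lt_noteStarts u
  have hE := pairwise_lt_noteEnds u
  have hpLe : ∀ x y : Int, x ≤ y → (decide (y ≤ i)) = true → (decide (x ≤ i)) = true := by
    intro x y h hy; simp at hy ⊢; omega
  have hpLt : ∀ x y : Int, x ≤ y → (decide (y < i)) = true → (decide (x < i)) = true := by
    intro x y h hy; simp at hy ⊢; omega
  constructor
  · rintro ⟨m, hm, h1, h2⟩
    have ha : m < (noteStarts u).countP (fun x => x ≤ i) := by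
      rw [sorted_countP_iff _ hS _ hpLe m hm]; simpa using h1
    have hb : (noteEnds u).countP (fun x => x < i) ≤ m := by
      by_contra hc
      push_neg at hc
      have := (sorted_countP_iff _ hE _ hpLt m (by omega)).mp hc
      simp at this; omega
    omega
  · intro hba
    set b := (noteEnds u).countP (fun x => x < i) with hbdef
    have hblen : b < (noteStarts u).length :=
      lt_of_lt_of_le hba (List.countP_le_length)
    refine ⟨b, hblen, ?_, ?_⟩
    · have := (sorted_countP_iff _ hS _ hpLe b hblen).mp hba
      simpa using this
    · have hbE : b < (noteEnds u).length := by omega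
      have := (sorted_countP_iff _ hE _ hpLt b hbE)
      have hnot : ¬ ((noteEnds u)[b] < i) := by
        intro hc
        have := this.mpr (by simpa using hc)
        omega
      omega

-- B's loop, written as structural recursion (proof helper)
def pickB (xs : List String) (opened closed : Int) : List String :=
  match xs with
  | [] => []
  | x :: t =>
    let o' := if hasOpener x then opened + 1 else opened
    let kept := if o' ≤ closed then [x] else ([] : List String)
    let c' := if hasCloser x then closed + 1 else closed
    kept ++ pickB t o' c'

theorem foldB_eq_pickB (xs : List String) (acc : List String) (o c : Int) :
    (xs.foldl
      (fun (st : List String × Int × Int) x =>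
        let opened := if hasOpener x then st.2.1 + 1 else st.2.1
        let new_utt := if opened ≤ st.2.2 then st.1 ++ [x] else st.1
        let closed := if hasCloser x then st.2.2 + 1 else st.2.2
        (new_utt, opened, closed))
      (acc, o, c)).1 = acc ++ pickB xs o c := by
  induction xs generalizing acc o c with
  | nil => simp [pickB]
  | cons x t ih =>
    simp only [List.foldl_cons, pickB]
    rw [ih]
    by_cases h : ((if hasOpener x then o + 1 else o) ≤ c) <;> simp [h]

theorem core_invariant (u : List String)
    (hlen : (noteStarts u).length = (noteEnds u).length) :
    ∀ (v : List String) (s : Nat), u.drop s = v →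
    ((PySem.List.enumerate v (s : Int)).filter (fun ix => decide (ix.1 ∉ exclOf u))).map (fun ix => ix.2)
      = pickB v ((noteStarts u).countP (fun y => y < (s : Int)) : Int)
               ((noteEnds u).countP (fun y => y < (s : Int)) : Int) := by
  intro v
  induction v with
  | nil => intro s _; simp [PySem.List.enumerate, pickB]
  | cons x t ih =>
    intro s hdrop
    have hs : s < u.length := by
      by_contra hc
      push_neg at hc
      rw [List.drop_eq_nil_of_le hc] at hdrop
      exact absurd hdrop (by simp)
    have hx : u[s] = x := by
      have : (u.drop s)[0]'(by rw [hdrop]; simp) = x := by simp [hdrop]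
      simpa [List.getElem_drop] using this
    have ht : u.drop (s + 1) = t := by
      have h2 : (u.drop s).tail = t := by rw [hdrop]; rfl
      rwa [List.tail_drop] at h2
    rw [PySem.List.enumerate_cons]
    have hmemS : ((s : Int) ∈ noteStarts u) ↔ hasOpener x = true := by
      rw [← hx]; exact natCast_mem_noteStarts u s hs
    have hmemE : ((s : Int) ∈ noteEnds u) ↔ hasCloser x = true := by
      rw [← hx]; exact natCast_mem_noteEnds u s hs
    have hSsplit : ((noteStarts u).countP (fun y => y ≤ (s : Int)) : Int)
        = ((noteStarts u).countP (fun y => y < (s : Int)) : Int) + (if hasOpener x then 1 else 0) := by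
      rw [countP_le_split _ (pairwise_lt_noteStarts u)]
      by_cases h : hasOpener x
      · have hm : ((s : Int) ∈ noteStarts u) := hmemS.mpr h
        simp [h, hm]
      · have hm : ¬ ((s : Int) ∈ noteStarts u) := fun hc => h (hmemS.mp hc)
        simp [h, hm]
    have hEsplit : ((noteEnds u).countP (fun y => y ≤ (s : Int)) : Int)
        = ((noteEnds u).countP (fun y => y < (s : Int)) : Int) + (if hasCloser x then 1 else 0) := by
      rw [countP_le_split _ (pairwise_lt_noteEnds u)]
      by_cases h : hasCloser x
      · have hm : ((s : Int) ∈ noteEnds u) := hmemE.mpr h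
        simp [h, hm]
      · have hm : ¬ ((s : Int) ∈ noteEnds u) := fun hc => h (hmemE.mp hc)
        simp [h, hm]
    have hexcl := excl_iff_counts u hlen (s : Int)
    have hkeep : ((s : Int) ∉ exclOf u)
        ↔ ((if hasOpener x then ((noteStarts u).countP (fun y => y < (s : Int)) : Int) + 1
              else ((noteStarts u).countP (fun y => y < (s : Int)) : Int))
            ≤ ((noteEnds u).countP (fun y => y < (s : Int)) : Int)) := by
      by_cases h : hasOpener x <;> [skip; skip] <;>
      · simp only [h, if_true, Bool.false_eq_true, if_false] at hSsplit ⊢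
        constructor
        · intro hne
          have hnc : ¬ ((noteEnds u).countP (fun y => y < (s : Int))
              < (noteStarts u).countP (fun y => y ≤ (s : Int))) :=
            fun hc => hne (hexcl.mpr hc)
          omega
        · intro hle hmem
          have hc := hexcl.mp hmem
          omega
    have hih := ih (s + 1) ht
    push_cast at hih
    rw [countP_lt_succ, countP_lt_succ] at hih
    rw [hSsplit, hEsplit] at hih
    have hiteS : ((noteStarts u).countP (fun y => y < (s : Int)) : Int)
          + (if hasOpener x then (1 : Int) else 0)
        = (if hasOpener x then ((noteStarts u).countP (fun y => y < (s : Int)) : Int) + 1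
            else ((noteStarts u).countP (fun y => y < (s : Int)) : Int)) := by
      by_cases h : hasOpener x <;> simp [h]
    have hiteE : ((noteEnds u).countP (fun y => y < (s : Int)) : Int)
          + (if hasCloser x then (1 : Int) else 0)
        = (if hasCloser x then ((noteEnds u).countP (fun y => y < (s : Int)) : Int) + 1
            else ((noteEnds u).countP (fun y => y < (s : Int)) : Int)) := by
      by_cases h : hasCloser x <;> simp [h]
    rw [hiteS, hiteE] at hih
    simp only [pickB]
    rw [List.filter_cons]
    by_cases hk : ((if hasOpener x then ((noteStarts u).countP (fun y => y < (s : Int)) : Int) + 1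
                    else ((noteStarts u).countP (fun y => y < (s : Int)) : Int))
                  ≤ ((noteEnds u).countP (fun y => y < (s : Int)) : Int))
    · have hd : decide ((s : Int) ∉ exclOf u) = true := decide_eq_true (hkeep.mpr hk)
      rw [hd]
      simp only [List.map_cons, if_pos hk, if_true]
      rw [← hih]
      simp
    · have hd : decide ((s : Int) ∉ exclOf u) = false := by
        simp only [decide_eq_false_iff_not]
        exact fun hne => hk (hkeep.mp hne)
      rw [hd]
      simp only [Bool.false_eq_true, if_false, if_neg hk, List.nil_append]
      exact hih

theorem noteStarts_eq_nil_iff (u : List String) :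
    noteStarts u = [] ↔ u.any (fun x => hasOpener x) = false := by
  constructor
  · intro h
    rw [List.any_eq_false]
    intro x hx
    obtain ⟨k, hk, rfl⟩ := List.mem_iff_getElem.mp hx
    intro hb
    have : ((k : Int)) ∈ noteStarts u := (natCast_mem_noteStarts u k hk).mpr hb
    simp [h] at this
  · intro h
    rcases hS : noteStarts u with _ | ⟨i, t⟩
    · rfl
    · exfalso
      have hi : i ∈ noteStarts u := by rw [hS]; simp
      rw [mem_noteStarts] at hi
      obtain ⟨k, hk, rfl, hb⟩ := hi
      rw [List.any_eq_false] at h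
      exact absurd hb (by simpa using h u[k] (List.getElem_mem hk))

theorem countP_lt_zero_eq (L : List Int) (hnn : ∀ i ∈ L, 0 ≤ i) :
    L.countP (fun x => x < (0 : Int)) = 0 := by
  refine List.countP_eq_zero.mpr (fun y hy => ?_)
  have := hnn y hy
  simp; omega

-- ===== VERDICT (by name: the statement is the Claim_ definition above) =====
theorem remove_notes_from_utt_spec : Claim_equal_remove_notes_from_utt := by
  intro u _ hpre
  unfold Spec_remove_notes_from_utt remove_notes_from_utt remove_notes_from_utt_alt
  by_cases hS : noteStarts u = []
  · have hany := (noteStarts_eq_nil_iff u).mp hS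
    simp [hS, hany]
  · obtain ⟨hlen, _⟩ := hpre hS
    have hany : u.any (fun x => hasOpener x) = true := by
      by_contra hc
      exact hS ((noteStarts_eq_nil_iff u).mpr (by simpa using hc))
    simp only [hS, hany, ne_eq, not_false_eq_true, if_true, not_true, if_neg]
    rw [show ((noteStarts u).zip (noteEnds u)).foldl
          (fun acc se => acc ++ PySem.List.pyRange se.1 (se.2 + 1)) [] = exclOf u by
        rw [PySem.List.foldl_append_eq_flatMap]; rfl]
    rw [PySem.List.foldl_append_ite (fun (ix : Int × String) => ix.1 ∉ exclOf u) (fun ix => ix.2)]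
    rw [foldB_eq_pickB]
    have h0 := core_invariant u hlen u 0 (by simp)
    simp only [Nat.cast_zero] at h0
    rw [countP_lt_zero_eq _ (nonneg_of_mem_noteStarts u),
        countP_lt_zero_eq _ (nonneg_of_mem_noteEnds u)] at h0
    simpa using h0
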